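-- pv_equiv track=rewrite | github.com/MonteNolen/MonteNolen | test.py | len_word
-- ===== SOURCE A (Python) =====
-- def len_word(string):
--     array = ''
--     for i in string:
--         for j in i:
--             if j.lower() in 'abcdefghijklmnopqrstuvwxyz' or j == ' ':
--                 array += j
--     array = array.split(' ')
--     new_array = []
--     for i in array:
--         new_array.append(len(i))
--     return new_array
-- ===== SOURCE B (Python) =====
-- def len_word(string):
--     result = []
--     count = 0
--     for c in string:
--         if c.lower() in 'abcdefghijklmnopqrstuvwxyz':
--             count += 1
--         elif c == ' ':
--             result.append(count)
--             count = 0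
--     result.append(count)
--     return result
-- ===== Notes on version B (the rewrite author's own statement) =====
-- stated objective: faster
-- what changed: Single pass over the characters keeping a running letter count that is flushed to the result at each space, instead of building a filtered string, splitting it on ' ' and measuring each piece.
import Mathlib
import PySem

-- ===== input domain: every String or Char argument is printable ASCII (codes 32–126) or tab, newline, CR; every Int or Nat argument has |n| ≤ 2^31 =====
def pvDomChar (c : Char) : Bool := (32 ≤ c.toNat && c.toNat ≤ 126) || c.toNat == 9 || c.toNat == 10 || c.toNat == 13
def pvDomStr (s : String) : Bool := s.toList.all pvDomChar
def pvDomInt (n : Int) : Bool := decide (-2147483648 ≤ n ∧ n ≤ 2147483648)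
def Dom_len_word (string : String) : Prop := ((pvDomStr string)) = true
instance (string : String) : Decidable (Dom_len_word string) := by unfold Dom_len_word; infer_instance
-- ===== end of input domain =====

-- B replaces A's filter-then-split-then-measure passes by one pass with a running count (objective: faster, constant-factor).

-- shared helper: the test `j.lower() in 'abcdefghijklmnopqrstuvwxyz'` (exact on the ASCII domain)
def pvIsLetter (c : Char) : Bool := "abcdefghijklmnopqrstuvwxyz".toList.contains (PySem.Chars.lowerChar c)

-- hand port of `array.split(' ')` for the single-character separator ' ': exact
-- (Python's str.split with a one-char sep cuts at every occurrence, keeping empty pieces)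
def pvSplitSp : List Char → List (List Char)
  | [] => [[]]
  | c :: rest =>
    if c = ' ' then [] :: pvSplitSp rest
    else match pvSplitSp rest with
         | w :: ws => (c :: w) :: ws
         | [] => [[c]]

-- ===== PORT A =====
def len_word (string : String) : List Int :=
  let array : List Char := string.toList.foldl
    (fun acc i => [i].foldl
      (fun acc2 j => if pvIsLetter j || j == ' ' then acc2 ++ [j] else acc2) acc) []
  let parts := pvSplitSp array
  parts.foldl (fun na i => na ++ [(i.length : Int)]) []

-- ===== PORT B =====
def pvStep (st : List Int × Int) (c : Char) : List Int × Int :=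
  if pvIsLetter c then (st.1, st.2 + 1)
  else if c == ' ' then (st.1 ++ [st.2], 0)
  else st

def len_word_alt (string : String) : List Int :=
  let st := string.toList.foldl pvStep ([], 0)
  st.1 ++ [st.2]

-- ===== PRECONDITION & SPEC =====
def Spec_len_word (string : String) (out : List Int) : Prop := out = len_word_alt string
instance (string : String) (out : List Int) : Decidable (Spec_len_word string out) := by unfold Spec_len_word; infer_instance

-- ===== CLAIM (what is proved, stated in full; the proofs are below) =====
def Claim_equal_len_word : Prop := ∀ (string : String), Dom_len_word string → Spec_len_word string (len_word string)

-- ===== LEMMAS AND PROOFS =====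

def pvKeep (c : Char) : Bool := pvIsLetter c || c == ' '

def pvBump (cnt : Int) : List Int → List Int
  | [] => [cnt]
  | x :: xs => (cnt + x) :: xs

lemma pvSplitSp_ne_nil (l : List Char) : pvSplitSp l ≠ [] := by
  cases l with
  | nil => simp [pvSplitSp]
  | cons c rest =>
    simp only [pvSplitSp]
    split
    · simp
    · cases h : pvSplitSp rest <;> simp

lemma filterA_eq (l : List Char) : ∀ acc : List Char,
    l.foldl (fun acc i => [i].foldl
      (fun acc2 j => if pvIsLetter j || j == ' ' then acc2 ++ [j] else acc2) acc) acc
      = acc ++ l.filter pvKeep := by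
  induction l with
  | nil => intro acc; simp [List.foldl]
  | cons c rest ih =>
    intro acc
    rw [List.foldl_cons, ih]
    by_cases h : pvKeep c = true
    · have h2 : (pvIsLetter c || c == ' ') = true := by simpa [pvKeep] using h
      simp [List.foldl, h2, h]
    · have h2 : (pvIsLetter c || c == ' ') = false := by simpa [pvKeep] using h
      simp [List.foldl, h2, h]

lemma mapLen_eq (parts : List (List Char)) : ∀ acc : List Int,
    parts.foldl (fun na i => na ++ [(i.length : Int)]) acc
      = acc ++ parts.map (fun i => (i.length : Int)) := by
  induction parts with
  | nil => intro acc; simp [List.foldl]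
  | cons p rest ih => intro acc; simp [List.foldl, ih]

lemma letter_ne_space {c : Char} (h : pvIsLetter c = true) : ¬ (c = ' ') := by
  intro hc; subst hc; revert h; decide

lemma loop_eq (l : List Char) : ∀ (res : List Int) (cnt : Int),
    (let st := l.foldl pvStep (res, cnt); st.1 ++ [st.2])
      = res ++ pvBump cnt ((pvSplitSp (l.filter pvKeep)).map (fun i => (i.length : Int))) := by
  induction l with
  | nil => intro res cnt; simp [List.foldl, pvSplitSp, pvBump]
  | cons c rest ih =>
    intro res cnt
    by_cases hl : pvIsLetter c = true
    · have hcs : ¬ (c = ' ') := letter_ne_space hl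
      have hk : pvKeep c = true := by simp [pvKeep, hl]
      obtain ⟨w, ws, hw⟩ := List.exists_cons_of_ne_nil (pvSplitSp_ne_nil (rest.filter pvKeep))
      simp only [List.foldl, pvStep, hl, if_pos, List.filter, hk]
      rw [ih]
      simp [pvSplitSp, hcs, hw, pvBump]
      ring
    · by_cases hs : c = ' '
      · subst hs
        have hk : pvKeep ' ' = true := by decide
        simp only [List.foldl, pvStep, hl, List.filter, hk]
        simp only [beq_self_eq_true, if_pos]
        rw [ih]
        obtain ⟨w, ws, hw⟩ := List.exists_cons_of_ne_nil (pvSplitSp_ne_nil (rest.filter pvKeep))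
        simp [pvSplitSp, pvBump, hw]
      · have hk : pvKeep c = false := by simp [pvKeep, hl, hs]
        simp only [List.foldl, pvStep, hl, List.filter, hk]
        have h2 : (c == ' ') = false := by simp [hs]
        simp only [h2, Bool.false_eq_true, if_false]
        rw [ih]

-- ===== VERDICT (by name: the statement is the Claim_ definition above) =====
theorem len_word_spec : Claim_equal_len_word := by
  intro s _
  unfold Spec_len_word len_word len_word_alt
  rw [filterA_eq, mapLen_eq, loop_eq]
  obtain ⟨w, ws, hw⟩ := List.exists_cons_of_ne_nil (pvSplitSp_ne_nil (s.toList.filter pvKeep))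
  simp [hw, pvBump]
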